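-- pv_equiv track=rewrite | github.com/morphiqlabs/morphiq-labs-skills | skills/morphiq-build/scripts/analyze-gaps.py | classify_gap
-- ===== SOURCE A (Python) =====
-- def classify_gap(gap_description: str) -> str:
--     """Classify a gap description into a gap type."""
--     desc_lower = gap_description.lower()
--
--     if any(w in desc_lower for w in ["statistic", "data", "number", "metric", "percentage", "benchmark"]):
--         return "data"
--     if any(w in desc_lower for w in ["table", "list", "format", "faq", "structured"]):
--         return "format"
--     if any(w in desc_lower for w in ["surface", "generic", "depth", "expert", "detail"]):
--         return "depth"
--     if any(w in desc_lower for w in ["brand", "competitor", "positioning", "comparison"]):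
--         return "brand_positioning"
--     if any(w in desc_lower for w in ["sub-query", "fanout", "sub-topic", "fan-out"]):
--         return "fanout_coverage"
--     return "content"
-- ===== SOURCE B (Python) =====
-- # Inverted index: each keyword maps to its category; collect the set of
-- # matched categories in one flat pass, then pick the highest-priority one.
-- KEYWORD_CATEGORY = {
--     "statistic": "data", "data": "data", "number": "data",
--     "metric": "data", "percentage": "data", "benchmark": "data",
--     "table": "format", "list": "format", "format": "format",
--     "faq": "format", "structured": "format",
--     "surface": "depth", "generic": "depth", "depth": "depth",
--     "expert": "depth", "detail": "depth",
--     "brand": "brand_positioning", "competitor": "brand_positioning",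
--     "positioning": "brand_positioning", "comparison": "brand_positioning",
--     "sub-query": "fanout_coverage", "fanout": "fanout_coverage",
--     "sub-topic": "fanout_coverage", "fan-out": "fanout_coverage",
-- }
--
-- PRIORITY = ("data", "format", "depth", "brand_positioning", "fanout_coverage")
--
--
-- def classify_gap(gap_description: str) -> str:
--     """Classify a gap description into a gap type."""
--     desc_lower = gap_description.lower()
--     matched = {cat for kw, cat in KEYWORD_CATEGORY.items() if kw in desc_lower}
--     return next((cat for cat in PRIORITY if cat in matched), "content")
-- ===== Notes on version B (the rewrite author's own statement) =====
-- stated objective: alternative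
-- what changed: Replaced the per-category if-chain of any() tests with an inverted keyword-to-category index: one flat pass collects the set of matched categories, then a separate priority pass selects the winner.
import Mathlib
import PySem

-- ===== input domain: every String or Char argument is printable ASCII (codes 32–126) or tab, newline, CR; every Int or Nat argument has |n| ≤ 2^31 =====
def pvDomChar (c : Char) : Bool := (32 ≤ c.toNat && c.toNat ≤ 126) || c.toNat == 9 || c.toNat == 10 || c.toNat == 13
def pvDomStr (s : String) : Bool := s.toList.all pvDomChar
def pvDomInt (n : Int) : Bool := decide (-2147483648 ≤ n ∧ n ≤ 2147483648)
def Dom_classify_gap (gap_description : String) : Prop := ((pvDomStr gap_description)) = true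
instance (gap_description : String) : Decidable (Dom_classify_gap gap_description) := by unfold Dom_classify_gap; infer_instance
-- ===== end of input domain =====

-- B inverts the classifier: a flat keyword->category index is scanned once to collect the SET of
-- matched categories, then a separate priority pass picks the winner (objective: alternative).
-- ===== PORT A =====
def classify_gap (gap_description : String) : String :=
  let desc_lower := PySem.Str.lower gap_description
  if ["statistic", "data", "number", "metric", "percentage", "benchmark"].any (fun w => PySem.Str.isIn w desc_lower) then "data"
  else if ["table", "list", "format", "faq", "structured"].any (fun w => PySem.Str.isIn w desc_lower) then "format"
  else if ["surface", "generic", "depth", "expert", "detail"].any (fun w => PySem.Str.isIn w desc_lower) then "depth"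
  else if ["brand", "competitor", "positioning", "comparison"].any (fun w => PySem.Str.isIn w desc_lower) then "brand_positioning"
  else if ["sub-query", "fanout", "sub-topic", "fan-out"].any (fun w => PySem.Str.isIn w desc_lower) then "fanout_coverage"
  else "content"

-- ===== PORT B =====
def keywordCategory : List (String × String) :=
  [("statistic", "data"), ("data", "data"), ("number", "data"),
   ("metric", "data"), ("percentage", "data"), ("benchmark", "data"),
   ("table", "format"), ("list", "format"), ("format", "format"),
   ("faq", "format"), ("structured", "format"),
   ("surface", "depth"), ("generic", "depth"), ("depth", "depth"),
   ("expert", "depth"), ("detail", "depth"),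
   ("brand", "brand_positioning"), ("competitor", "brand_positioning"),
   ("positioning", "brand_positioning"), ("comparison", "brand_positioning"),
   ("sub-query", "fanout_coverage"), ("fanout", "fanout_coverage"),
   ("sub-topic", "fanout_coverage"), ("fan-out", "fanout_coverage")]

def priorityOrder : List String :=
  ["data", "format", "depth", "brand_positioning", "fanout_coverage"]

-- the set comprehension {cat for kw, cat in KEYWORD_CATEGORY.items() if kw in desc_lower}
def matchedSet (desc_lower : String) : PySem.Set String :=
  PySem.Set.ofList ((keywordCategory.filter (fun kc => PySem.Str.isIn kc.1 desc_lower)).map (·.2))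

def classify_gap_alt (gap_description : String) : String :=
  let desc_lower := PySem.Str.lower gap_description
  let matched := matchedSet desc_lower
  ((priorityOrder.find? (fun cat => PySem.Set.contains matched cat)).getD "content")

-- ===== PRECONDITION & SPEC =====
def Spec_classify_gap (gap_description : String) (out : String) : Prop := out = classify_gap_alt gap_description
instance (gap_description : String) (out : String) : Decidable (Spec_classify_gap gap_description out) := by unfold Spec_classify_gap; infer_instance

-- ===== CLAIM =====
def Claim_equal_classify_gap : Prop := ∀ (gap_description : String), Dom_classify_gap gap_description → Spec_classify_gap gap_description (classify_gap gap_description)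

-- ===== LEMMAS AND PROOFS =====

-- the matched set contains a category iff one of that category's keywords occurs in the string
theorem contains_data (d : String) :
    PySem.Set.contains (matchedSet d) "data"
    = (["statistic", "data", "number", "metric", "percentage", "benchmark"] : List String).any (fun w => PySem.Str.isIn w d) := by
  rw [Bool.eq_iff_iff]
  simp [matchedSet, PySem.Set.mem_ofList, List.mem_map, List.mem_filter, keywordCategory]

theorem contains_format (d : String) :
    PySem.Set.contains (matchedSet d) "format"
    = (["table", "list", "format", "faq", "structured"] : List String).any (fun w => PySem.Str.isIn w d) := by
  rw [Bool.eq_iff_iff]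
  simp [matchedSet, PySem.Set.mem_ofList, List.mem_map, List.mem_filter, keywordCategory]

theorem contains_depth (d : String) :
    PySem.Set.contains (matchedSet d) "depth"
    = (["surface", "generic", "depth", "expert", "detail"] : List String).any (fun w => PySem.Str.isIn w d) := by
  rw [Bool.eq_iff_iff]
  simp [matchedSet, PySem.Set.mem_ofList, List.mem_map, List.mem_filter, keywordCategory]

theorem contains_brand (d : String) :
    PySem.Set.contains (matchedSet d) "brand_positioning"
    = (["brand", "competitor", "positioning", "comparison"] : List String).any (fun w => PySem.Str.isIn w d) := by
  rw [Bool.eq_iff_iff]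
  simp [matchedSet, PySem.Set.mem_ofList, List.mem_map, List.mem_filter, keywordCategory]

theorem contains_fanout (d : String) :
    PySem.Set.contains (matchedSet d) "fanout_coverage"
    = (["sub-query", "fanout", "sub-topic", "fan-out"] : List String).any (fun w => PySem.Str.isIn w d) := by
  rw [Bool.eq_iff_iff]
  simp [matchedSet, PySem.Set.mem_ofList, List.mem_map, List.mem_filter, keywordCategory]

-- ===== VERDICT =====
theorem classify_gap_spec : Claim_equal_classify_gap := by
  intro s _
  unfold Spec_classify_gap classify_gap classify_gap_alt
  simp only [priorityOrder, List.find?]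
  rw [contains_data, contains_format, contains_depth, contains_brand, contains_fanout]
  cases h1 : (["statistic", "data", "number", "metric", "percentage", "benchmark"] : List String).any (fun w => PySem.Str.isIn w (PySem.Str.lower s)) <;>
  cases h2 : (["table", "list", "format", "faq", "structured"] : List String).any (fun w => PySem.Str.isIn w (PySem.Str.lower s)) <;>
  cases h3 : (["surface", "generic", "depth", "expert", "detail"] : List String).any (fun w => PySem.Str.isIn w (PySem.Str.lower s)) <;>
  cases h4 : (["brand", "competitor", "positioning", "comparison"] : List String).any (fun w => PySem.Str.isIn w (PySem.Str.lower s)) <;>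
  cases h5 : (["sub-query", "fanout", "sub-topic", "fan-out"] : List String).any (fun w => PySem.Str.isIn w (PySem.Str.lower s)) <;>
  simp
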